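-- pv_equiv track=rewrite | github.com/icecube/skyllh | skyllh/core/datafields.py | or_check
-- ===== SOURCE A (Python) =====
-- def or_check(
--         stage,
--         stages,
-- ):
--     """Checks if the given stage matches any of the given stages.
--
--     Parameters
--     ----------
--     stage : int
--         The stage value, which should get checked.
--     stages : int | sequence of int
--         The stage(s) to check for.
--
--     Returns
--     -------
--     check : bool
--         ``True`` if the given stage contains any of the given stages,
--         ``False`` otherwise.
--     """
--     if isinstance(stages, int):
--         return (stage & stages != 0)
--
--     for stage_ in stages:
--         if stage & stage_ != 0:
--             return True
--
--     return False
-- ===== SOURCE B (Python) =====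
-- from functools import reduce
-- from operator import or_
--
-- def or_check(
--         stage,
--         stages,
-- ):
--     """Checks if the given stage matches any of the given stages."""
--     if isinstance(stages, int):
--         return (stage & stages != 0)
--
--     combined = reduce(or_, stages, 0)
--     return (stage & combined != 0)
-- ===== Notes on version B (the rewrite author's own statement) =====
-- stated objective: alternative
-- what changed: Replaces A's per-element short-circuiting scan with a single OR-fold of all stages into one combined bitmask followed by one AND test.
import Mathlib
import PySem

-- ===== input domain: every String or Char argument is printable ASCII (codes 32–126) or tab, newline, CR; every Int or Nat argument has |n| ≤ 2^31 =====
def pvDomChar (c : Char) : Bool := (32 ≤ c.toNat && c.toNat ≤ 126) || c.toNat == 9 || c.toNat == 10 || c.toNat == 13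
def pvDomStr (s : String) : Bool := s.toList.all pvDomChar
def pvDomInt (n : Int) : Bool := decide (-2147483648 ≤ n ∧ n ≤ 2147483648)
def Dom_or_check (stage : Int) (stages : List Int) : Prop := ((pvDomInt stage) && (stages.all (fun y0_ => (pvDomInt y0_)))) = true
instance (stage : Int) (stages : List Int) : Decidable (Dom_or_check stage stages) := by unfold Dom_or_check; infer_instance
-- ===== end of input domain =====

-- B replaces A's per-element short-circuiting scan by OR-folding all stages into one
-- combined bitmask followed by a single AND test (different decomposition, same cost).


-- ===== PORT A =====
-- A's `isinstance(stages, int)` branch is unreachable here: `stages` is a List Int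
-- under the type convention, so only the sequence path is ported.
-- The `for` loop with early `return True` becomes structural recursion.
def orCheckLoop (stage : Int) : List Int → Bool
  | [] => false
  | s :: rest => if PySem.Int.band stage s ≠ 0 then true else orCheckLoop stage rest

def or_check (stage : Int) (stages : List Int) : Bool :=
  orCheckLoop stage stages

-- ===== PORT B =====
-- reduce(or_, stages, 0) is a left fold of bitwise OR starting at 0.
def or_check_alt (stage : Int) (stages : List Int) : Bool :=
  decide (PySem.Int.band stage (stages.foldl PySem.Int.bor 0) ≠ 0)

-- ===== PRECONDITION & SPEC =====
def Spec_or_check (stage : Int) (stages : List Int) (out : Bool) : Prop := out = or_check_alt stage stages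
instance (stage : Int) (stages : List Int) (out : Bool) : Decidable (Spec_or_check stage stages out) := by unfold Spec_or_check; infer_instance

-- ===== CLAIM (what is proved, stated in full; the proofs are below) =====
def Claim_equal_or_check : Prop := ∀ (stage : Int) (stages : List Int), Dom_or_check stage stages → Spec_or_check stage stages (or_check stage stages)

-- ===== LEMMAS AND PROOFS =====

-- Nat: disjoint bits add like OR.
theorem pvAddEqOr (a : Nat) : ∀ b, a &&& b = 0 → a + b = a ||| b := by
  induction a using Nat.strong_induction_on with
  | _ a ih =>
    intro b h
    rcases Nat.eq_zero_or_pos a with ha | ha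
    · simp [ha]
    have hd : a / 2 &&& b / 2 = 0 := by
      have := @Nat.and_div_two_pow a b 1
      simp [h] at this; omega
    have hih := ih (a / 2) (by omega) (b / 2) hd
    have hor2 : (a ||| b) / 2 = a / 2 ||| b / 2 := by
      have := @Nat.or_div_two_pow a b 1; simpa using this
    have hm : (a ||| b) % 2 = a % 2 ||| b % 2 := by
      have := @Nat.or_mod_two_pow a b 1; simpa using this
    have hma : a % 2 &&& b % 2 = 0 := by
      have := @Nat.and_mod_two_pow a b 1; simp [h] at this; omega
    have h2a := Nat.mod_two_eq_zero_or_one a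
    have h2b := Nat.mod_two_eq_zero_or_one b
    have hmod : a % 2 ||| b % 2 = a % 2 + b % 2 := by
      rcases h2a with h1 | h1 <;> rcases h2b with h2 | h2 <;> rw [h1, h2] <;> rw [h1, h2] at hma <;> simp_all
    have := Nat.div_add_mod (a ||| b) 2
    omega

-- Nat: clearing the common bits is bitwise difference.
theorem pvSubAndEqLdiff (m n : Nat) : m - (m &&& n) = Nat.ldiff m n := by
  have h1 : (m &&& n) ||| Nat.ldiff m n = m := by
    apply Nat.eq_of_testBit_eq; intro k
    simp [Nat.testBit_ldiff]
    cases Nat.testBit m k <;> cases Nat.testBit n k <;> simp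
  have h2 : (m &&& n) &&& Nat.ldiff m n = 0 := by
    apply Nat.eq_of_testBit_eq; intro k
    simp [Nat.testBit_ldiff]
    cases Nat.testBit m k <;> cases Nat.testBit n k <;> simp
  have h3 := pvAddEqOr (m &&& n) (Nat.ldiff m n) h2
  omega

theorem pvNatEqZeroIff (n : Nat) : n = 0 ↔ ∀ k, n.testBit k = false := by
  constructor
  · rintro rfl k; simp
  · intro h; apply Nat.eq_of_testBit_eq; intro k; simp [h k]

-- the k-th bit of the infinite two's-complement representation of an Int
def pvBit (a : Int) (k : Nat) : Bool :=
  if 0 ≤ a then a.toNat.testBit k else !((-a - 1).toNat.testBit k)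

theorem pvBit_zero (k : Nat) : pvBit 0 k = false := by simp [pvBit]

theorem pvBandZero (a b : Int) :
    PySem.Int.band a b = 0 ↔ ∀ k, (pvBit a k && pvBit b k) = false := by
  unfold PySem.Int.band pvBit
  split_ifs with ha hb hb
  · rw [show ((a.toNat &&& b.toNat : Nat) : Int) = 0 ↔ (a.toNat &&& b.toNat) = 0 by exact_mod_cast Int.natCast_eq_zero]
    rw [pvNatEqZeroIff]
    simp [Nat.testBit_and]
  · rw [show ((a.toNat - (a.toNat &&& (-b - 1).toNat) : Nat) : Int) = 0 ↔ (a.toNat - (a.toNat &&& (-b - 1).toNat)) = 0 by exact_mod_cast Int.natCast_eq_zero]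
    rw [pvSubAndEqLdiff, pvNatEqZeroIff]
    simp [Nat.testBit_ldiff]
  · rw [show ((b.toNat - (b.toNat &&& (-a - 1).toNat) : Nat) : Int) = 0 ↔ (b.toNat - (b.toNat &&& (-a - 1).toNat)) = 0 by exact_mod_cast Int.natCast_eq_zero]
    rw [pvSubAndEqLdiff, pvNatEqZeroIff]
    constructor <;> intro h k <;> have hh := h k <;>
      cases h1 : Nat.testBit (-a - 1).toNat k <;> cases h2 : Nat.testBit b.toNat k <;>
        simp_all [Nat.testBit_ldiff]
  · constructor
    · intro h
      exfalso
      have : (0 : Int) ≤ ((-a - 1).toNat ||| (-b - 1).toNat : Nat) := Int.natCast_nonneg _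
      omega
    · intro h
      exfalso
      set m := (-a - 1).toNat
      set n := (-b - 1).toNat
      have hk : Nat.testBit m (m + n) = false ∧ Nat.testBit n (m + n) = false := by
        constructor <;> apply Nat.testBit_eq_false_of_lt
        · calc m ≤ m + n := Nat.le_add_right _ _
            _ < 2 ^ (m + n) := Nat.lt_two_pow_self
        · calc n ≤ m + n := Nat.le_add_left _ _
            _ < 2 ^ (m + n) := Nat.lt_two_pow_self
      have := h (m + n)
      rw [hk.1, hk.2] at this
      simp at this

theorem pvBit_bor (a b : Int) (k : Nat) :
    pvBit (PySem.Int.bor a b) k = (pvBit a k || pvBit b k) := by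
  unfold PySem.Int.bor
  split_ifs with ha hb hb
  · have : (0 : Int) ≤ ((a.toNat ||| b.toNat : Nat) : Int) := Int.natCast_nonneg _
    simp [pvBit, ha, hb, this, Nat.testBit_or]
  · have h0 : ¬ (0 : Int) ≤ -((((-b - 1).toNat - ((-b - 1).toNat &&& a.toNat) : Nat) : Int)) - 1 := by
      have : (0 : Int) ≤ (((-b - 1).toNat - ((-b - 1).toNat &&& a.toNat) : Nat) : Int) := Int.natCast_nonneg _
      omega
    simp only [pvBit, if_neg h0, if_pos ha, if_neg hb]
    have h1 : (-(-((((-b - 1).toNat - ((-b - 1).toNat &&& a.toNat) : Nat) : Int)) - 1) - 1).toNat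
        = (-b - 1).toNat - ((-b - 1).toNat &&& a.toNat) := by
      omega
    rw [h1, pvSubAndEqLdiff]
    cases h2 : Nat.testBit a.toNat k <;> cases h3 : Nat.testBit (-b - 1).toNat k <;>
      simp_all [Nat.testBit_ldiff]
  · have h0 : ¬ (0 : Int) ≤ -((((-a - 1).toNat - ((-a - 1).toNat &&& b.toNat) : Nat) : Int)) - 1 := by
      have : (0 : Int) ≤ (((-a - 1).toNat - ((-a - 1).toNat &&& b.toNat) : Nat) : Int) := Int.natCast_nonneg _
      omega
    simp only [pvBit, if_neg h0, if_neg ha, if_pos hb]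
    have h1 : (-(-((((-a - 1).toNat - ((-a - 1).toNat &&& b.toNat) : Nat) : Int)) - 1) - 1).toNat
        = (-a - 1).toNat - ((-a - 1).toNat &&& b.toNat) := by
      omega
    rw [h1, pvSubAndEqLdiff]
    cases h2 : Nat.testBit b.toNat k <;> cases h3 : Nat.testBit (-a - 1).toNat k <;>
      simp_all [Nat.testBit_ldiff]
  · have h0 : ¬ (0 : Int) ≤ -((((-a - 1).toNat &&& (-b - 1).toNat : Nat) : Int)) - 1 := by
      have : (0 : Int) ≤ (((-a - 1).toNat &&& (-b - 1).toNat : Nat) : Int) := Int.natCast_nonneg _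
      omega
    simp only [pvBit, if_neg h0, if_neg ha, if_neg hb]
    have h1 : (-(-((((-a - 1).toNat &&& (-b - 1).toNat : Nat) : Int)) - 1) - 1).toNat
        = (-a - 1).toNat &&& (-b - 1).toNat := by
      omega
    rw [h1]
    simp [Nat.testBit_and]

theorem pvBit_fold (l : List Int) (k : Nat) : ∀ a0 : Int,
    pvBit (l.foldl PySem.Int.bor a0) k = (pvBit a0 k || l.any (fun s => pvBit s k)) := by
  induction l with
  | nil => intro a0; simp
  | cons x rest ih =>
    intro a0
    simp only [List.foldl_cons, List.any_cons, ih, pvBit_bor]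
    cases pvBit a0 k <;> cases pvBit x k <;> simp

theorem pvLoopIff (stage : Int) (l : List Int) :
    orCheckLoop stage l = true ↔ ∃ s ∈ l, PySem.Int.band stage s ≠ 0 := by
  induction l with
  | nil => simp [orCheckLoop]
  | cons x rest ih =>
    by_cases hx : PySem.Int.band stage x ≠ 0
    · simp [orCheckLoop, hx]
    · simp only [orCheckLoop, if_neg hx, ih]
      push Not at hx
      simp [hx]

theorem pvBandNeZeroIff (a b : Int) :
    PySem.Int.band a b ≠ 0 ↔ ∃ k, (pvBit a k && pvBit b k) = true := by
  rw [Ne, pvBandZero]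
  push Not
  constructor
  · rintro ⟨k, hk⟩; exact ⟨k, by simpa using hk⟩
  · rintro ⟨k, hk⟩; exact ⟨k, by simp [hk]⟩

-- ===== VERDICT (by name: the statement is the Claim_ definition above) =====
theorem or_check_spec : Claim_equal_or_check := by
  intro stage stages _
  unfold Spec_or_check or_check or_check_alt
  rw [Bool.eq_iff_iff]
  rw [pvLoopIff, decide_eq_true_iff]
  rw [pvBandNeZeroIff]
  constructor
  · rintro ⟨s, hs, hband⟩
    rw [pvBandNeZeroIff] at hband
    obtain ⟨k, hk⟩ := hband
    refine ⟨k, ?_⟩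
    rw [pvBit_fold stages k 0, pvBit_zero]
    simp only [Bool.false_or]
    simp at hk ⊢
    exact ⟨hk.1, s, hs, hk.2⟩
  · rintro ⟨k, hk⟩
    rw [pvBit_fold stages k 0, pvBit_zero] at hk
    simp only [Bool.false_or] at hk
    simp at hk
    obtain ⟨h1, s, hs, h2⟩ := hk
    refine ⟨s, hs, ?_⟩
    rw [pvBandNeZeroIff]
    exact ⟨k, by simp [h1, h2]⟩
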